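-- pv_equiv track=rewrite | github.com/ylu999/jingu-swebench | scripts/repair_prompts.py | _extract_test_traceback
-- ===== SOURCE A (Python) =====
-- _MAX_MESSAGE_LEN = 200
--
-- _MAX_TRACEBACK_LEN = 400
--
-- def _extract_test_traceback(stdout: str, test_name: str) -> tuple[str, str]:
--     """Extract assertion message and traceback for a specific failing test.
--
--     Searches stdout for the test's FAIL/ERROR block and extracts the
--     assertion message and a compact traceback excerpt.
--
--     Returns (message, traceback_excerpt) — both capped to limits.
--     """
--     if not stdout or not test_name:
--         return "", ""
--
--     # Strategy: find the test name in output, then grab the traceback block.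
--     # Django unittest format:
--     #   ======...
--     #   FAIL: test_name (module.Class)
--     #   ------...
--     #   Traceback (most recent call last):
--     #     File "...", line N, in ...
--     #   AssertionError: ...
--     #   ======...  (next block or end)
--     lines = stdout.split("\n")
--     block_lines: list[str] = []
--     found_test = False
--     in_traceback = False
--
--     for line in lines:
--         # Start of new test failure block
--         if line.startswith("=" * 20):
--             if found_test and block_lines:
--                 break  # end of our test's block — hit next separator
--             block_lines = []
--             found_test = False
--             in_traceback = False
--             continue
--
--         # Check if this is the header for our test
--         if not found_test and test_name in line:
--             found_test = True
--             continue
--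
--         # Dash separator between header and traceback
--         if found_test and line.startswith("-" * 20):
--             in_traceback = True
--             continue
--
--         # Collect traceback lines
--         if found_test and in_traceback:
--             block_lines.append(line)
--
--     if not found_test or not block_lines:
--         # Fallback: search for test name anywhere and grab surrounding lines
--         for i, line in enumerate(lines):
--             if test_name in line and any(w in line.upper() for w in ("FAIL", "ERROR")):
--                 start = max(0, i - 2)
--                 end = min(len(lines), i + 10)
--                 block_lines = lines[start:end]
--                 found_test = True
--                 break
--
--     if not block_lines:
--         return "", ""
--
--     block_text = "\n".join(block_lines)
--
--     # Extract assertion message (last line with "Error" or "assert")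
--     message = ""
--     for bl in reversed(block_lines):
--         bl_s = bl.strip()
--         if bl_s and ("Error" in bl_s or "assert" in bl_s.lower()):
--             message = bl_s
--             break
--     if not message and block_lines:
--         # Fallback: last non-empty line
--         for bl in reversed(block_lines):
--             if bl.strip():
--                 message = bl.strip()
--                 break
--
--     # Cap lengths
--     message = message[:_MAX_MESSAGE_LEN]
--     traceback_excerpt = block_text[:_MAX_TRACEBACK_LEN]
--
--     return message, traceback_excerpt
-- ===== SOURCE B (Python) =====
-- _MAX_MESSAGE_LEN = 200
--
-- _MAX_TRACEBACK_LEN = 400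
--
--
-- def _block_excerpt(blk, test_name):
--     """Traceback lines of one separator-delimited block, or [] if the block
--     has no header line containing test_name or no dash separator after it."""
--     for i, line in enumerate(blk):
--         if test_name in line:
--             rest = blk[i + 1:]
--             for j, l2 in enumerate(rest):
--                 if l2.startswith("-" * 20):
--                     return [l3 for l3 in rest[j + 1:]
--                             if not l3.startswith("-" * 20)]
--             return []
--     return []
--
--
-- def _extract_test_traceback(stdout: str, test_name: str) -> tuple[str, str]:
--     if not stdout or not test_name:
--         return "", ""
--
--     lines = stdout.split("\n")
--
--     # Segment into blocks at '='*20 separator lines, then take the first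
--     # block whose traceback excerpt is non-empty.
--     blocks = []
--     cur = []
--     for line in lines:
--         if line.startswith("=" * 20):
--             blocks.append(cur)
--             cur = []
--         else:
--             cur.append(line)
--     blocks.append(cur)
--
--     block_lines = next(
--         (e for e in (_block_excerpt(b, test_name) for b in blocks) if e), [])
--
--     if not block_lines:
--         # Fallback: test name on a FAIL/ERROR line, grab surrounding lines.
--         for i, line in enumerate(lines):
--             u = line.upper()
--             if test_name in line and ("FAIL" in u or "ERROR" in u):
--                 block_lines = lines[max(0, i - 2):i + 10]
--                 break
--
--     if not block_lines:
--         return "", ""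
--
--     stripped = [bl.strip() for bl in reversed(block_lines)]
--     message = next(
--         (s for s in stripped if s and ("Error" in s or "assert" in s.lower())),
--         next((s for s in stripped if s), ""))
--
--     return message[:_MAX_MESSAGE_LEN], "\n".join(block_lines)[:_MAX_TRACEBACK_LEN]
-- ===== Notes on version B (the rewrite author's own statement) =====
-- stated objective: alternative
-- what changed: A is a single stateful scan over all lines with found/in_traceback flags and a break; B first segments stdout into '='-separator blocks, extracts each block's post-dash excerpt independently, and takes the first non-empty one, with the message picked by two find?-style searches over a once-stripped reversed list.
import Mathlib
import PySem

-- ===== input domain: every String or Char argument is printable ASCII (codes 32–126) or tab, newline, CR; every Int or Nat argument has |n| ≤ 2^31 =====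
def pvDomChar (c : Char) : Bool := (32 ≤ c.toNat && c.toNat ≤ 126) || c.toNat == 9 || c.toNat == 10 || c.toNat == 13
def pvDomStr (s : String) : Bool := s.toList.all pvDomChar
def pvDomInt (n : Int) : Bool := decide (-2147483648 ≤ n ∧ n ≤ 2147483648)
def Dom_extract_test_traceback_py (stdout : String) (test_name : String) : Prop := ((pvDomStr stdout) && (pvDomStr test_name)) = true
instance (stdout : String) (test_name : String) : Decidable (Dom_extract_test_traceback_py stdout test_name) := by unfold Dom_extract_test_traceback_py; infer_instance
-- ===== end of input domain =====

-- B re-implements A by segmenting stdout into '='-separator blocks and taking the first block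
-- whose traceback excerpt is non-empty (objective: alternative decomposition, same cost).

-- ===== PORT A =====
-- shared one-line separators ("="*20 / "-"*20 prefixes, as in the Python)
def pvSep (l : String) : Bool := PySem.Str.startswith l "===================="
def pvDash (l : String) : Bool := PySem.Str.startswith l "--------------------"

-- A's main for-loop over lines; state = (block_lines, found_test, in_traceback); result (block_lines, found_test)
def pvALoop (tn : String) : List String → List String → Bool → Bool → List String × Bool
  | [], block, found, _ => (block, found)
  | l :: ls, block, found, intb =>
    if pvSep l then
      if found && !block.isEmpty then (block, found)
      else pvALoop tn ls [] false false
    else if !found && PySem.Str.isIn tn l then pvALoop tn ls block true intb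
    else if found && pvDash l then pvALoop tn ls block found true
    else if found && intb then pvALoop tn ls (block ++ [l]) found intb
    else pvALoop tn ls block found intb

-- A's fallback for-loop with break (some = the assigned block_lines)
def pvAFallback (tn : String) (lines : List String) : List (Int × String) → Option (List String)
  | [] => none
  | (i, l) :: r =>
    if PySem.Str.isIn tn l && (["FAIL", "ERROR"].any fun w => PySem.Str.isIn w (PySem.Str.upper l)) then
      some (PySem.List.slice lines (some (max 0 (i - 2))) (some (min (lines.length : Int) (i + 10))))
    else pvAFallback tn lines r

-- A's reversed scan for the assertion message
def pvAMsg1 : List String → String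
  | [] => ""
  | bl :: r =>
    let s := PySem.Str.strip bl
    if PySem.Str.len s != 0 && (PySem.Str.isIn "Error" s || PySem.Str.isIn "assert" (PySem.Str.lower s)) then s
    else pvAMsg1 r

-- A's reversed fallback scan (last non-empty stripped line)
def pvAMsg2 : List String → String
  | [] => ""
  | bl :: r =>
    if PySem.Str.len (PySem.Str.strip bl) != 0 then PySem.Str.strip bl
    else pvAMsg2 r

-- A's final section (message extraction and caps) on the chosen block_lines
def pvATail (block : List String) : String × String :=
  if block.isEmpty then ("", "")
  else
    let block_text := PySem.Str.join "\n" block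
    let message := pvAMsg1 block.reverse
    let message := if PySem.Str.len message == 0 && !block.isEmpty then pvAMsg2 block.reverse else message
    (PySem.Str.slice message none (some 200), PySem.Str.slice block_text none (some 400))

def extract_test_traceback_py (stdout : String) (test_name : String) : String × String :=
  if PySem.Str.len stdout == 0 || PySem.Str.len test_name == 0 then ("", "")
  else
    let lines := (PySem.Str.split? stdout "\n").getD []
    let st := pvALoop test_name lines [] false false
    let st2 :=
      if !st.2 || st.1.isEmpty then
        match pvAFallback test_name lines (PySem.List.enumerate lines) with
        | some b => (b, true)
        | none => st
      else st
    pvATail st2.1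

-- ===== PORT B =====
-- drop lines up to the first dash separator, keep the rest minus dash separators
def pvBAfterDash : List String → List String
  | [] => []
  | l :: r => if pvDash l then r.filter (fun x => !pvDash x) else pvBAfterDash r

-- _block_excerpt: first line containing test_name, then the post-dash collection
def pvBExcerpt (tn : String) : List String → List String
  | [] => []
  | l :: r => if PySem.Str.isIn tn l then pvBAfterDash r else pvBExcerpt tn r

-- segment lines into blocks at '='-separator lines
def pvBSegment : List String → List String → List (List String)
  | [], cur => [cur]
  | l :: ls, cur => if pvSep l then cur :: pvBSegment ls [] else pvBSegment ls (cur ++ [l])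

-- first non-empty excerpt among the blocks
def pvBFirst (tn : String) : List (List String) → List String
  | [] => []
  | b :: r => let e := pvBExcerpt tn b; if e.isEmpty then pvBFirst tn r else e

-- B's fallback loop with break
def pvBFallback (tn : String) (lines : List String) : List (Int × String) → Option (List String)
  | [] => none
  | (i, l) :: r =>
    let u := PySem.Str.upper l
    if PySem.Str.isIn tn l && (PySem.Str.isIn "FAIL" u || PySem.Str.isIn "ERROR" u) then
      some (PySem.List.slice lines (some (max 0 (i - 2))) (some (i + 10)))
    else pvBFallback tn lines r

-- B's final section: strip once, two find?-searches, caps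
def pvBTail (block : List String) : String × String :=
  if block.isEmpty then ("", "")
  else
    let stripped := block.reverse.map PySem.Str.strip
    let message :=
      ((stripped.find? fun s => PySem.Str.len s != 0 &&
          (PySem.Str.isIn "Error" s || PySem.Str.isIn "assert" (PySem.Str.lower s))).getD
        ((stripped.find? fun s => PySem.Str.len s != 0).getD ""))
    (PySem.Str.slice message none (some 200),
     PySem.Str.slice (PySem.Str.join "\n" block) none (some 400))

def extract_test_traceback_py_alt (stdout : String) (test_name : String) : String × String :=
  if PySem.Str.len stdout == 0 || PySem.Str.len test_name == 0 then ("", "")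
  else
    let lines := (PySem.Str.split? stdout "\n").getD []
    let block0 := pvBFirst test_name (pvBSegment lines [])
    let block :=
      if block0.isEmpty then (pvBFallback test_name lines (PySem.List.enumerate lines)).getD []
      else block0
    pvBTail block

-- ===== PRECONDITION & SPEC =====
def Spec_extract_test_traceback_py (stdout : String) (test_name : String) (out : String × String) : Prop := out = extract_test_traceback_py_alt stdout test_name
instance (stdout : String) (test_name : String) (out : String × String) : Decidable (Spec_extract_test_traceback_py stdout test_name out) := by unfold Spec_extract_test_traceback_py; infer_instance

-- ===== CLAIM (what is proved, stated in full; the proofs are below) =====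
def Claim_equal_extract_test_traceback_py : Prop := ∀ (stdout : String) (test_name : String), Dom_extract_test_traceback_py stdout test_name → Spec_extract_test_traceback_py stdout test_name (extract_test_traceback_py stdout test_name)

-- ===== LEMMAS AND PROOFS =====

-- bSegment produces (cur ++ first segment) :: segmentation of the remainder
theorem pvBSegment_eq (ls cur : List String) :
    pvBSegment ls cur =
      (cur ++ ls.takeWhile (fun l => !pvSep l)) ::
        (match ls.dropWhile (fun l => !pvSep l) with
         | [] => []
         | _ :: r => pvBSegment r []) := by
  induction ls generalizing cur with
  | nil => simp [pvBSegment]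
  | cons l ls ih =>
    by_cases h : pvSep l = true
    · simp [pvBSegment, h]
    · simp only [Bool.not_eq_true] at h
      simp [pvBSegment, h, ih]

-- A's loop in the collecting phase (found = true, in_traceback = true)
theorem pvALoop_collect (tn : String) (ls block : List String) :
    pvALoop tn ls block true true =
      (let blk := block ++ (ls.takeWhile (fun l => !pvSep l)).filter (fun x => !pvDash x)
       match ls.dropWhile (fun l => !pvSep l) with
       | [] => (blk, true)
       | _ :: r => if blk.isEmpty then pvALoop tn r [] false false else (blk, true)) := by
  induction ls generalizing block with
  | nil => simp [pvALoop]
  | cons l ls ih =>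
    by_cases h : pvSep l = true
    · simp [pvALoop, h]
    · simp only [Bool.not_eq_true] at h
      by_cases hd : pvDash l = true
      · simp [pvALoop, h, hd, ih]
      · simp only [Bool.not_eq_true] at hd
        simp [pvALoop, h, hd, ih]

-- A's loop after the header, before the dash separator (found = true, in_traceback = false)
theorem pvALoop_found (tn : String) (ls : List String) :
    pvALoop tn ls [] true false =
      (let blk := pvBAfterDash (ls.takeWhile (fun l => !pvSep l))
       match ls.dropWhile (fun l => !pvSep l) with
       | [] => (blk, true)
       | _ :: r => if blk.isEmpty then pvALoop tn r [] false false else (blk, true)) := by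
  induction ls with
  | nil => simp [pvALoop, pvBAfterDash]
  | cons l ls ih =>
    by_cases h : pvSep l = true
    · simp [pvALoop, h, pvBAfterDash]
    · simp only [Bool.not_eq_true] at h
      by_cases hd : pvDash l = true
      · simp [pvALoop, h, hd, pvBAfterDash, pvALoop_collect]
      · simp only [Bool.not_eq_true] at hd
        simp [pvALoop, h, hd, pvBAfterDash, ih]

-- A's loop from a block start (found = false): excerpt of the current segment, then restart
theorem pvALoop_start (tn : String) (ls : List String) :
    pvALoop tn ls [] false false =
      (let blk := pvBExcerpt tn (ls.takeWhile (fun l => !pvSep l))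
       match ls.dropWhile (fun l => !pvSep l) with
       | [] => (blk, (ls.takeWhile (fun l => !pvSep l)).any (fun l => PySem.Str.isIn tn l))
       | _ :: r => if blk.isEmpty then pvALoop tn r [] false false else (blk, true)) := by
  induction ls with
  | nil => simp [pvALoop, pvBExcerpt]
  | cons l ls ih =>
    by_cases h : pvSep l = true
    · simp [pvALoop, h, pvBExcerpt]
    · simp only [Bool.not_eq_true] at h
      by_cases hh : PySem.Chars.isIn tn.toList l.toList = true
      · simp [pvALoop, h, hh, pvBExcerpt, pvALoop_found]
      · simp only [Bool.not_eq_true] at hh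
        simp [pvALoop, h, hh, pvBExcerpt, ih]

-- a non-empty excerpt needs a header line
theorem pvBExcerpt_ne (tn : String) (b : List String) (h : pvBExcerpt tn b ≠ []) :
    b.any (fun l => PySem.Str.isIn tn l) = true := by
  induction b with
  | nil => simp [pvBExcerpt] at h
  | cons l r ih =>
    by_cases hh : PySem.Chars.isIn tn.toList l.toList = true
    · simp [hh]
    · simp only [Bool.not_eq_true] at hh
      simp [pvBExcerpt, hh] at h
      simp only [List.any_cons]
      refine Bool.or_eq_true .. ▸ Or.inr ?_
      exact ih h

-- main correspondence: A's loop computes B's first non-empty excerpt (and found on success)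
theorem pvMain (tn : String) : ∀ (n : Nat) (ls : List String), ls.length ≤ n →
    (pvALoop tn ls [] false false).1 = pvBFirst tn (pvBSegment ls []) ∧
    ((pvALoop tn ls [] false false).1 ≠ [] → (pvALoop tn ls [] false false).2 = true) := by
  intro n
  induction n with
  | zero =>
    intro ls hls
    have : ls = [] := List.eq_nil_of_length_eq_zero (Nat.le_zero.mp hls)
    subst this
    simp [pvALoop, pvBSegment, pvBFirst, pvBExcerpt]
  | succ n ih =>
    intro ls hls
    rw [pvALoop_start, pvBSegment_eq]
    have hlen := List.takeWhile_append_dropWhile (p := fun l => !pvSep l) (l := ls)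
    cases hdw : ls.dropWhile (fun l => !pvSep l) with
    | nil =>
      constructor
      · by_cases hblk : pvBExcerpt tn (ls.takeWhile (fun l => !pvSep l)) = []
        · simp [pvBFirst, hblk]
        · simp [pvBFirst, hblk]
      · intro hne
        exact pvBExcerpt_ne tn _ hne
    | cons x r =>
      have hr : r.length ≤ n := by
        have := congrArg List.length hlen
        simp [hdw] at this
        omega
      by_cases hblk : pvBExcerpt tn (ls.takeWhile (fun l => !pvSep l)) = []
      · simpa [pvBFirst, hblk] using ih r hr
      · simp [pvBFirst, hblk]

-- the two fallback loops agree on index lists with non-negative indices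
theorem pvFallback_eq (tn : String) (lines : List String) :
    ∀ e : List (Int × String), (∀ p ∈ e, 0 ≤ p.1) →
    pvAFallback tn lines e = pvBFallback tn lines e := by
  intro e
  induction e with
  | nil => intro _; rfl
  | cons p r ih =>
    intro hpos
    obtain ⟨i, l⟩ := p
    have hi : (0:Int) ≤ i := hpos (i, l) (by simp)
    have hmin : PySem.List.slice lines (some (max 0 (i - 2))) (some (min (lines.length : Int) (i + 10))) =
        PySem.List.slice lines (some (max 0 (i - 2))) (some (i + 10))  := by
      have hc : PySem.List.clampIdx lines.length (min (lines.length : Int) (i + 10)) =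
          PySem.List.clampIdx lines.length (i + 10) := by
        unfold PySem.List.clampIdx
        split_ifs <;> omega
      simp [PySem.List.slice, hc]
    simp only [pvAFallback, pvBFallback, List.any_cons, List.any_nil, Bool.or_false, hmin]
    split_ifs with h1
    · rfl
    · exact ih fun q hq => hpos q (by simp [hq])

-- enumerate (from 0) yields non-negative indices
theorem pvEnumerate_nonneg {α : Type} (xs : List α) (p : Int × α)
    (hp : p ∈ PySem.List.enumerate xs 0) : 0 ≤ p.1 := by
  rw [PySem.List.mem_enumerate_iff] at hp
  obtain ⟨k, hk, rfl⟩ := hp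
  simp

-- A's first message scan = find? over the stripped reversed lines
theorem pvAMsg1_eq (r : List String) :
    pvAMsg1 r = ((r.map PySem.Str.strip).find? fun s => PySem.Str.len s != 0 &&
      (PySem.Str.isIn "Error" s || PySem.Str.isIn "assert" (PySem.Str.lower s))).getD "" := by
  induction r with
  | nil => simp [pvAMsg1]
  | cons bl r ih =>
    cases h : (PySem.Str.len (PySem.Str.strip bl) != 0 &&
        (PySem.Str.isIn "Error" (PySem.Str.strip bl) ||
          PySem.Str.isIn "assert" (PySem.Str.lower (PySem.Str.strip bl)))) with
    | true => simp only [pvAMsg1, List.map_cons, List.find?_cons, h, Option.getD_some, if_true]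
    | false => simp only [pvAMsg1, List.map_cons, List.find?_cons, h, Bool.false_eq_true,
        if_false, ih]

-- A's fallback message scan = find? of the first non-empty stripped line
theorem pvAMsg2_eq (r : List String) :
    pvAMsg2 r = ((r.map PySem.Str.strip).find? fun s => PySem.Str.len s != 0).getD "" := by
  induction r with
  | nil => simp [pvAMsg2]
  | cons bl r ih =>
    cases h : (PySem.Str.len (PySem.Str.strip bl) != 0) with
    | true => simp only [pvAMsg2, List.map_cons, List.find?_cons, h, Option.getD_some, if_true]
    | false => simp only [pvAMsg2, List.map_cons, List.find?_cons, h, Bool.false_eq_true,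
        if_false, ih]

-- the two final sections agree on every block
theorem pvTail_eq (b : List String) : pvATail b = pvBTail b := by
  by_cases hb : b.isEmpty = true
  · simp [pvATail, pvBTail, hb]
  · simp only [pvATail, pvBTail, hb, Bool.false_eq_true, if_false, pvAMsg1_eq, pvAMsg2_eq]
    cases hf : ((b.reverse.map PySem.Str.strip).find? fun s => PySem.Str.len s != 0 &&
        (PySem.Str.isIn "Error" s || PySem.Str.isIn "assert" (PySem.Str.lower s))) with
    | none => simp
    | some s =>
      have hs := List.find?_some hf
      have hne : ¬ s = "" := by
        rcases Bool.and_eq_true .. ▸ hs with ⟨h1, _⟩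
        simpa using h1
      simp [hne]

-- ===== VERDICT (by name: the statement is the Claim_ definition above) =====
theorem extract_test_traceback_py_spec : Claim_equal_extract_test_traceback_py := by
  intro stdout tn _
  unfold Spec_extract_test_traceback_py
  by_cases h0 : (PySem.Str.len stdout == 0 || PySem.Str.len tn == 0) = true
  · have h0' : stdout = "" ∨ tn = "" := by simpa using h0
    simp [extract_test_traceback_py, extract_test_traceback_py_alt, h0']
  · simp only [extract_test_traceback_py, extract_test_traceback_py_alt, h0,
      Bool.false_eq_true, if_false]
    set lines := (PySem.Str.split? stdout "\n").getD [] with hl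
    obtain ⟨h1, h2⟩ := pvMain tn lines.length lines (le_refl _)
    rw [pvFallback_eq tn lines _ (fun p hp => pvEnumerate_nonneg lines p hp)]
    by_cases hb : (pvALoop tn lines [] false false).1 = []
    · have hcond : (!(pvALoop tn lines [] false false).2 ||
          (pvALoop tn lines [] false false).1.isEmpty) = true := by simp [hb]
      rw [if_pos hcond]
      have hb0 : (pvBFirst tn (pvBSegment lines [])).isEmpty = true := by
        rw [← h1]; simp [hb]
      rw [if_pos hb0]
      cases hfb : pvBFallback tn lines (PySem.List.enumerate lines) with
      | none => simp [pvTail_eq, hb]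
      | some bl => simp [pvTail_eq]
    · have hcond : (!(pvALoop tn lines [] false false).2 ||
          (pvALoop tn lines [] false false).1.isEmpty) = false := by
        simp [h2 hb, hb]
      rw [if_neg (by simp [hcond])]
      have hb0 : (pvBFirst tn (pvBSegment lines [])).isEmpty = false := by
        rw [← h1]; simp [hb]
      rw [if_neg (by simp [hb0]), ← h1, pvTail_eq]
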